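-- pv_equiv track=rewrite | github.com/paultoster/toolsHome | tools_tb/python3/hfkt2.py | list_list_elim_compare
-- ===== SOURCE A (Python) =====
-- def list_list_elim_compare(ll,delta,index_compare=0,reverse=False):
--   """
--        ll = list_list_elim_compare(ll,delta,index_compare=0,reverse=False)
-- #      ll = [list1,list2,list3]   list in list  => if index_compare = 1 => list2 will be compared
-- #      if difference between list2[i+1] - list2[i] < delta => i+1 is eliminated in list1, list2, list3 (reverse = False) or i is eliminated reverse = True
--   """
--   n1 = len(ll)
--   while(n1):
--     if( isinstance(ll[n1-1],list) ):
--       break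
--     else:
--       n1 -= 1
--     #endif
--   #endwhile
--
--   if( n1 == 0):
--     return ll
--   #endif
--
--   indexlist = [min(max(0,index_compare),n1-1)]
--   nmax      = len(ll[indexlist[0]])
--
--   for i in range(n1):
--
--     if( i != indexlist[0] ):
--       if( isinstance(ll[i],list) and len(ll[i]) >= nmax):
--         indexlist.append(i)
--       #endif
--     #endif
--   #endfor
--
--   n2 = len(indexlist)
--
--
--   delta = abs(delta)
--
--   i = 1
--   while( i < nmax):
--
--     if( abs(ll[indexlist[0]][i] - ll[indexlist[0]][i-1]) < delta ):
--
--       if( reverse == True ):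
--
--         j = i-1
--
--       else:
--
--         j = i
--
--       #endif
--
--       for ii in range(n2):
--         iii  = indexlist[ii]
--         del(ll[iii][j])
--       #endfor
--
--       nmax -= 1
--
--     else:
--       i += 1
--   #endwhile
--
--   return ll
-- ===== SOURCE B (Python) =====
-- def list_list_elim_compare(ll, delta, index_compare=0, reverse=False):
--     n1 = len(ll)
--     if n1 == 0:
--         return ll
--     c = min(max(0, index_compare), n1 - 1)
--     v = ll[c]
--     nmax = len(v)
--     d = abs(delta)
--     if reverse:
--         keep = [k for k in range(nmax - 1) if abs(v[k + 1] - v[k]) >= d]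
--         if nmax > 0:
--             keep.append(nmax - 1)
--     else:
--         keep = []
--         if nmax > 0:
--             keep = [0]
--             last = v[0]
--             for k in range(1, nmax):
--                 if abs(v[k] - last) >= d:
--                     keep.append(k)
--                     last = v[k]
--     return [[x[p] for p in keep] + x[nmax:] if (i == c or len(x) >= nmax) else x
--             for i, x in enumerate(ll)]
-- ===== Notes on version B (the rewrite author's own statement) =====
-- stated objective: faster
-- what changed: Instead of repeatedly deleting elements mid-list from every indexed list inside the while loop (a positional shift per deletion per list), B makes one scan of the comparison list to compute the list of surviving original indices (a greedy last-kept scan for reverse=False, a consecutive-pairs filter for reverse=True) and rebuilds each affected list once by indexing.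
import Mathlib
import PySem

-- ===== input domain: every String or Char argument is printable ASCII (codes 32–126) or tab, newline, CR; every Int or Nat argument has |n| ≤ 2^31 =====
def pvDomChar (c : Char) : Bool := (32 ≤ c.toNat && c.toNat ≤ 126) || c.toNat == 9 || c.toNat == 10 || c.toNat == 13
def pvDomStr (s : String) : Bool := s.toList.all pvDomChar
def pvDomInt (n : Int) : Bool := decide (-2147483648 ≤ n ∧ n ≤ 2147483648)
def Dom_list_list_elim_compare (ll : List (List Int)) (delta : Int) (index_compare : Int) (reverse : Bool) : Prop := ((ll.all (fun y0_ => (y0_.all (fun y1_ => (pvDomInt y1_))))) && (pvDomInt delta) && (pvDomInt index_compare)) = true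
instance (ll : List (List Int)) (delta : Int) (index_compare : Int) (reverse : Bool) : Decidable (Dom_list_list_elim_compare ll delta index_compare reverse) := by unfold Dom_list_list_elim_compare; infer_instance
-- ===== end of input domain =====

-- B replaces A's repeated in-place mid-list deletion passes by one scan of the comparison list that
-- computes the surviving indices and a rebuild of each affected list by indexing (objective: faster).
-- A mutates ll in place and returns it; B builds fresh lists — the equivalence proved is about the RETURN value.

-- ===== PORT A =====
-- Python: while(n1): if isinstance(ll[n1-1],list): break ; else: n1 -= 1
-- For ll : List (List Int) every element is a list, so the loop breaks at once (or ends at 0).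
def pvN1_list_list_elim_compare : Nat → Nat
  | 0 => 0
  | n+1 => n+1

-- Python 'del xs[j]' for 0 ≤ j < len xs (exact there; A only deletes in-range positions)
def pvDelAt {α : Type} (xs : List α) (j : Nat) : List α := xs.take j ++ xs.drop (j+1)

-- ll[i]; the indices A uses are always in range, so the default is never returned
def pvGetL (ll : List (List Int)) (i : Int) : List Int := PySem.List.pyGetD ll i []

-- in-place 'll[iii] = x'; every index in indexlist comes from range(n1) or the clamp, hence ≥ 0, so .toNat is exact
def pvSetAt (ll : List (List Int)) (iii : Int) (x : List Int) : List (List Int) := ll.set iii.toNat x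

-- A's main while loop; the inner 'for ii in range(n2): del ll[indexlist[ii]][j]' is the foldl
-- the loop runs at most nmax times (each step raises i or lowers nmax); fuel = nmax only totalizes it
def pvALoop (idxs : List Int) (delta : Int) (reverse : Bool) : Nat → List (List Int) → Nat → Nat → List (List Int)
  | 0, ll, _, _ => ll
  | fuel+1, ll, i, nmax =>
    if i < nmax then
      if |PySem.List.pyGetD (pvGetL ll (idxs.headD 0)) (i : Int) 0 -
          PySem.List.pyGetD (pvGetL ll (idxs.headD 0)) ((i : Int) - 1) 0| < delta then
        pvALoop idxs delta reverse fuel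
          (idxs.foldl (fun acc iii => pvSetAt acc iii (pvDelAt (pvGetL acc iii) (if reverse then i - 1 else i))) ll)
          i (nmax - 1)
      else
        pvALoop idxs delta reverse fuel ll (i+1) nmax
    else ll

def list_list_elim_compare (ll : List (List Int)) (delta : Int) (index_compare : Int) (reverse : Bool) : List (List Int) :=
  let n1 := pvN1_list_list_elim_compare ll.length
  if n1 = 0 then ll
  else
    let idx0 : Int := min (max 0 index_compare) ((n1 : Int) - 1)
    let nmax := (pvGetL ll idx0).length
    let indexlist := (PySem.List.pyRange 0 (n1 : Int) 1).foldl
      (fun acc i => if i ≠ idx0 ∧ nmax ≤ (pvGetL ll i).length then acc ++ [i] else acc) [idx0]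
    pvALoop indexlist |delta| reverse nmax ll 1 nmax

-- ===== PORT B =====
-- B's forward scan: for k in range(1, nmax): if abs(v[k]-last) >= d: keep.append(k); last = v[k]
-- fuel = nmax only totalizes the for-loop (k runs from 1 to nmax-1)
def pvBFwd (v : List Int) (d : Int) : Nat → Int → Nat → Nat → List Nat
  | 0, _, _, _ => []
  | fuel+1, last, k, nmax =>
    if k < nmax then
      if d ≤ |PySem.List.pyGetD v (k : Int) 0 - last| then
        k :: pvBFwd v d fuel (PySem.List.pyGetD v (k : Int) 0) (k+1) nmax
      else pvBFwd v d fuel last (k+1) nmax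
    else []

def list_list_elim_compare_alt (ll : List (List Int)) (delta : Int) (index_compare : Int) (reverse : Bool) : List (List Int) :=
  if ll.length = 0 then ll
  else
    let c : Int := min (max 0 index_compare) ((ll.length : Int) - 1)
    let v := PySem.List.pyGetD ll c []
    let nmax := v.length
    let d := |delta|
    let keep : List Nat :=
      if reverse then
        (List.range (nmax - 1)).filter
          (fun k => d ≤ |PySem.List.pyGetD v ((k+1 : Nat) : Int) 0 - PySem.List.pyGetD v (k : Int) 0|)
        ++ (if 0 < nmax then [nmax - 1] else [])
      else if 0 < nmax then 0 :: pvBFwd v d nmax (PySem.List.pyGetD v 0 0) 1 nmax else []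
    (PySem.List.enumerate ll).map (fun p =>
      if p.1 = c ∨ nmax ≤ p.2.length then
        keep.map (fun (q : Nat) => PySem.List.pyGetD p.2 (q : Int) 0) ++ p.2.drop nmax
      else p.2)

-- ===== PRECONDITION & SPEC =====
def Spec_list_list_elim_compare (ll : List (List Int)) (delta : Int) (index_compare : Int) (reverse : Bool) (out : List (List Int)) : Prop := out = list_list_elim_compare_alt ll delta index_compare reverse
instance (ll : List (List Int)) (delta : Int) (index_compare : Int) (reverse : Bool) (out : List (List Int)) : Decidable (Spec_list_list_elim_compare ll delta index_compare reverse out) := by unfold Spec_list_list_elim_compare; infer_instance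

-- ===== CLAIM (what is proved, stated in full; the proofs are below) =====
def Claim_equal_list_list_elim_compare : Prop := ∀ (ll : List (List Int)) (delta : Int) (index_compare : Int) (reverse : Bool), Dom_list_list_elim_compare ll delta index_compare reverse → Spec_list_list_elim_compare ll delta index_compare reverse (list_list_elim_compare ll delta index_compare reverse)

-- ===== LEMMAS AND PROOFS =====

-- abstract index-level version of A's loop: K = surviving original positions of the comparison list
def kLoop (v : List Int) (d : Int) (rev : Bool) (K : List Nat) (i : Nat) : List Nat :=
  if _h : i < K.length then
    if |v.getD (K.getD i 0) 0 - v.getD (K.getD (i-1) 0) 0| < d then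
      kLoop v d rev (pvDelAt K (if rev then i - 1 else i)) i
    else kLoop v d rev K (i+1)
  else K
  termination_by K.length - i
  decreasing_by
    · simp only [pvDelAt, List.length_append, List.length_take, List.length_drop]
      split <;> omega
    · omega

-- greedy forward thinning on a list of positions (what B's forward scan computes)
def fwdSpec (v : List Int) (d : Int) : List Nat → Int → List Nat
  | [], _ => []
  | q :: t, last =>
      if d ≤ |v.getD q 0 - last| then q :: fwdSpec v d t (v.getD q 0) else fwdSpec v d t last

-- pairwise thinning (reverse = True) on a list of positions
def revSpec (v : List Int) (d : Int) : List Nat → List Nat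
  | [] => []
  | [q] => [q]
  | q :: q' :: t =>
      if d ≤ |v.getD q' 0 - v.getD q 0| then q :: revSpec v d (q' :: t) else revSpec v d (q' :: t)

-- the shape of A's mutable state during the loop
def pvState (ll0 : List (List Int)) (idxs : List Int) (nmax0 : Nat) (K : List Nat) : List (List Int) :=
  ll0.mapIdx (fun t x => if (t : Int) ∈ idxs then K.map (fun q => x.getD q 0) ++ x.drop nmax0 else x)

theorem pvDelAt_append_left {α : Type} (A B : List α) (j : Nat) (h : j < A.length) :
    pvDelAt (A ++ B) j = pvDelAt A j ++ B := by
  unfold pvDelAt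
  rw [List.take_append_of_le_length (by omega), List.drop_append_of_le_length (by omega)]
  simp

theorem pvDelAt_map {α β : Type} (f : α → β) (K : List α) (j : Nat) :
    pvDelAt (K.map f) j = (pvDelAt K j).map f := by
  simp [pvDelAt, List.map_take, List.map_drop]

theorem length_pvDelAt {α : Type} (xs : List α) (j : Nat) (h : j < xs.length) :
    (pvDelAt xs j).length = xs.length - 1 := by
  simp [pvDelAt]; omega

theorem delAt_take (K : List Nat) (i : Nat) (h : i < K.length) (j : Nat) (hj : j ≤ i) :
    (pvDelAt K i).take j = K.take j := by
  unfold pvDelAt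
  rw [List.take_append_of_le_length (by simp; omega), List.take_take, min_eq_left hj]

theorem delAt_drop (K : List Nat) (i : Nat) (h : i < K.length) :
    (pvDelAt K i).drop i = K.drop (i+1) := by
  unfold pvDelAt
  rw [List.drop_append_of_le_length (by simp; omega)]
  simp

theorem delAt_getD (K : List Nat) (i : Nat) (h : i < K.length) (j : Nat) (hj : j < i) :
    (pvDelAt K i).getD j 0 = K.getD j 0 := by
  unfold pvDelAt
  rw [List.getD_append _ _ _ _ (by simp; omega)]
  simp [List.getD_eq_getElem?_getD, List.getElem?_take_of_lt hj]

theorem fwdSpec_nil (v : List Int) (d last : Int) : fwdSpec v d [] last = [] := rfl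

theorem fwdSpec_cons (v : List Int) (d last : Int) (q : Nat) (t : List Nat) :
    fwdSpec v d (q :: t) last =
      if d ≤ |v.getD q 0 - last| then q :: fwdSpec v d t (v.getD q 0) else fwdSpec v d t last := rfl

theorem revSpec_nil (v : List Int) (d : Int) : revSpec v d [] = [] := rfl

theorem revSpec_single (v : List Int) (d : Int) (q : Nat) : revSpec v d [q] = [q] := rfl

theorem revSpec_cons₂ (v : List Int) (d : Int) (q q' : Nat) (t : List Nat) :
    revSpec v d (q :: q' :: t) =
      if d ≤ |v.getD q' 0 - v.getD q 0| then q :: revSpec v d (q' :: t) else revSpec v d (q' :: t) := rfl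

theorem kLoop_fwd (v : List Int) (d : Int) (K : List Nat) (i : Nat) :
    1 ≤ i → kLoop v d false K i = K.take i ++ fwdSpec v d (K.drop i) (v.getD (K.getD (i-1) 0) 0) := by
  fun_induction kLoop v d false K i with
  | case1 K i h hc ih =>
    intro hi
    simp only [dite_false, Bool.false_eq_true, if_false] at ih ⊢
    rw [ih hi, delAt_take K i h i le_rfl, delAt_drop K i h,
        delAt_getD K i h (i-1) (by omega)]
    rw [List.drop_eq_getElem_cons h, fwdSpec_cons,
        if_neg (by rw [List.getD_eq_getElem _ _ h] at hc; omega)]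
  | case2 K i h hc ih =>
    intro hi
    rw [ih (by omega), List.drop_eq_getElem_cons h, fwdSpec_cons,
        if_pos (by rw [List.getD_eq_getElem _ _ h] at hc; omega)]
    simp only [List.getElem?_eq_getElem h, List.take_add_one,
      Option.toList_some, List.append_assoc, List.singleton_append,
      Nat.add_sub_cancel, List.getD_eq_getElem _ _ h]
  | case3 K i h =>
    intro hi
    rw [List.drop_of_length_le (by omega), List.take_of_length_le (by omega), fwdSpec_nil,
        List.append_nil]

theorem kLoop_rev (v : List Int) (d : Int) (K : List Nat) (i : Nat) :
    1 ≤ i → kLoop v d true K i = K.take (i-1) ++ revSpec v d (K.drop (i-1)) := by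
  fun_induction kLoop v d true K i with
  | case1 K i h hc ih =>
    intro hi
    simp only [dite_true, if_true] at ih ⊢
    have h1 : i - 1 < K.length := by omega
    rw [ih hi, delAt_take K (i-1) h1 (i-1) le_rfl, delAt_drop K (i-1) h1,
        Nat.sub_add_cancel hi]
    have h2 : K.drop (i-1) = K[i-1] :: K[i] :: K.drop (i+1) := by
      rw [List.drop_eq_getElem_cons h1, Nat.sub_add_cancel hi, List.drop_eq_getElem_cons h]
    rw [h2, revSpec_cons₂,
        if_neg (by rw [List.getD_eq_getElem _ _ h, List.getD_eq_getElem _ _ h1] at hc; omega),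
        ← List.drop_eq_getElem_cons h]
  | case2 K i h hc ih =>
    intro hi
    have h1 : i - 1 < K.length := by omega
    rw [ih (by omega)]
    simp only [Nat.add_sub_cancel]
    have h2 : K.drop (i-1) = K[i-1] :: K[i] :: K.drop (i+1) := by
      rw [List.drop_eq_getElem_cons h1, Nat.sub_add_cancel hi, List.drop_eq_getElem_cons h]
    rw [h2, revSpec_cons₂,
        if_pos (by rw [List.getD_eq_getElem _ _ h, List.getD_eq_getElem _ _ h1] at hc; omega),
        ← List.drop_eq_getElem_cons h]
    have h3 : K.take i = K.take (i-1) ++ [K[i-1]] := by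
      conv_lhs => rw [show i = (i-1)+1 by omega]
      rw [List.take_add_one, List.getElem?_eq_getElem h1]
      rfl
    rw [h3, List.append_assoc]
    rfl
  | case3 K i h =>
    intro hi
    by_cases hlen : K.length ≤ i - 1
    · rw [List.drop_of_length_le hlen, List.take_of_length_le hlen, revSpec_nil, List.append_nil]
    · have hi' : i = K.length := by omega
      have h1 : i - 1 < K.length := by omega
      rw [List.drop_eq_getElem_cons h1, List.drop_of_length_le (by omega), revSpec_single]
      conv_lhs => rw [show K = K.take ((i-1)+1) by rw [show (i-1)+1 = K.length by omega]; simp]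
      rw [List.take_add_one, List.getElem?_eq_getElem h1]
      rfl

theorem filter_eq_revSpec (v : List Int) (d : Int) (nmax k : Nat) (hk : k ≤ nmax - 1) (h0 : 0 < nmax) :
    ((List.range (nmax - 1)).drop k).filter
        (fun q => decide (d ≤ |v.getD (q+1) 0 - v.getD q 0|)) ++ [nmax - 1]
      = revSpec v d ((List.range nmax).drop k) := by
  by_cases he : k = nmax - 1
  · subst he
    rw [List.drop_of_length_le (by simp), List.drop_eq_getElem_cons (by simp; omega),
        List.drop_of_length_le (by simp; omega)]
    simp [revSpec_single]
  · have hk2 : k < nmax - 1 := by omega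
    have h2 : (List.range nmax).drop k = k :: (k+1) :: (List.range nmax).drop (k+2) := by
      rw [List.drop_eq_getElem_cons (by simp; omega), List.getElem_range,
          List.drop_eq_getElem_cons (by simp; omega), List.getElem_range]
    have h3 : (List.range nmax).drop (k+1) = (k+1) :: (List.range nmax).drop (k+2) := by
      rw [List.drop_eq_getElem_cons (by simp; omega), List.getElem_range]
    rw [h2, revSpec_cons₂, ← h3,
        List.drop_eq_getElem_cons (l := List.range (nmax-1)) (by simp; omega), List.getElem_range,
        List.filter_cons]
    rw [← filter_eq_revSpec v d nmax (k+1) (by omega) h0]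
    split_ifs with hcond hd hd
    · rfl
    · simp at hcond hd; omega
    · simp at hcond hd; omega
    · rfl
  termination_by nmax - k

theorem pvBFwd_eq (v : List Int) (d : Int) (fuel : Nat) (last : Int) (k nmax : Nat)
    (hf : nmax - k ≤ fuel) :
    pvBFwd v d fuel last k nmax = fwdSpec v d ((List.range nmax).drop k) last := by
  induction fuel generalizing last k with
  | zero =>
    rw [List.drop_of_length_le (by simp; omega)]
    rfl
  | succ fuel ih =>
    rw [pvBFwd]
    by_cases h : k < nmax
    · rw [if_pos h, List.drop_eq_getElem_cons (by simpa using h)]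
      simp only [List.getElem_range, fwdSpec]
      by_cases hc : d ≤ |PySem.List.pyGetD v (k : Int) 0 - last|
      · rw [if_pos hc, if_pos (by simpa using hc), ih _ _ (by omega)]
        simp
      · rw [if_neg hc, if_neg (by simpa using hc), ih _ _ (by omega)]
    · rw [if_neg h, List.drop_of_length_le (by simpa using Nat.le_of_not_lt h)]
      rfl

theorem map_getD_range (l : List Int) (n : Nat) (h : n ≤ l.length) :
    (List.range n).map (fun q => l.getD q 0) = l.take n := by
  apply List.ext_getElem
  · simp; omega
  · intro k h1 h2
    simp [List.getD_eq_getElem?_getD]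
    rw [List.getElem?_eq_getElem (by simp at h1; omega)]
    simp

theorem foldl_del_general (g : List Int → List Int) (sub : List Int) (ll_s : List (List Int))
    (hnd : sub.Nodup) (hrange : ∀ iii ∈ sub, 0 ≤ iii ∧ iii < (ll_s.length : Int)) :
    sub.foldl (fun acc iii => pvSetAt acc iii (g (pvGetL acc iii))) ll_s
      = ll_s.mapIdx (fun t x => if (t : Int) ∈ sub then g x else x) := by
  induction sub generalizing ll_s with
  | nil =>
    simp only [List.foldl_nil, List.not_mem_nil, if_false]
    apply List.ext_getElem (by simp)
    intro t h1 h2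
    simp
  | cons iii rest ih =>
    simp only [List.foldl_cons]
    have hiii := hrange iii (by simp)
    have hlt : iii.toNat < ll_s.length := by omega
    have hset : pvSetAt ll_s iii (g (pvGetL ll_s iii))
        = ll_s.set iii.toNat (g ll_s[iii.toNat]) := by
      unfold pvSetAt pvGetL
      rw [PySem.List.pyGetD_eq_getElem _ _ hiii.1 (by omega)]
    rw [hset, ih _ (List.Nodup.of_cons hnd) (by intro x hx; simpa using hrange x (by simp [hx]))]
    apply List.ext_getElem (by simp)
    intro t h1 h2
    simp only [List.getElem_mapIdx, List.getElem_set, List.mem_cons]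
    have hne : iii ∉ rest := by simp at hnd; tauto
    by_cases hm : (t : Int) ∈ rest
    · have htne : iii.toNat ≠ t := by
        intro he; subst he; rw [Int.toNat_of_nonneg hiii.1] at hm; exact hne hm
      simp [hm, htne]
    · by_cases hte : iii.toNat = t
      · subst hte
        simp only [Int.toNat_of_nonneg hiii.1]
        simp
        exact fun hx => absurd hx hne
      · have hne2 : ¬ (t : Int) = iii := by omega
        simp [hm, hte, hne2]

theorem foldl_del_pvState (ll0 : List (List Int)) (idxs : List Int) (nmax0 : Nat) (K : List Nat)
    (j : Nat) (hj : j < K.length)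
    (hnd : idxs.Nodup) (hrange : ∀ iii ∈ idxs, 0 ≤ iii ∧ iii < (ll0.length : Int)) :
    idxs.foldl (fun acc iii => pvSetAt acc iii (pvDelAt (pvGetL acc iii) j)) (pvState ll0 idxs nmax0 K)
      = pvState ll0 idxs nmax0 (pvDelAt K j) := by
  rw [foldl_del_general (fun x => pvDelAt x j) idxs _ hnd (by simpa [pvState] using hrange)]
  unfold pvState
  apply List.ext_getElem (by simp)
  intro t h1 h2
  simp only [List.getElem_mapIdx]
  by_cases hm : (t : Int) ∈ idxs
  · rw [if_pos hm, if_pos hm, if_pos hm,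
        pvDelAt_append_left _ _ j (by simpa using hj), pvDelAt_map]
  · simp [hm]

theorem pvState_get_idx0 (ll0 : List (List Int)) (idxs : List Int) (nmax0 : Nat)
    (idx0 : Int) (hmem : idx0 ∈ idxs) (hidx0 : 0 ≤ idx0 ∧ idx0 < (ll0.length : Int))
    (hv : (PySem.List.pyGetD ll0 idx0 []).length = nmax0) (K : List Nat) :
    pvGetL (pvState ll0 idxs nmax0 K) idx0
      = K.map (fun q => (PySem.List.pyGetD ll0 idx0 []).getD q 0) := by
  unfold pvGetL pvState
  rw [PySem.List.pyGetD_eq_getElem _ _ hidx0.1 (by simpa using hidx0.2)]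
  rw [List.getElem_mapIdx]
  rw [Int.toNat_of_nonneg hidx0.1]
  rw [if_pos hmem]
  rw [PySem.List.pyGetD_eq_getElem _ _ hidx0.1 (by omega)] at hv ⊢
  rw [List.drop_of_length_le (by omega), List.append_nil]

theorem pvALoop_eq_kLoop (ll0 : List (List Int)) (idxs : List Int) (nmax0 : Nat)
    (idx0 : Int) (hhead : idxs.headD 0 = idx0) (hmem : idx0 ∈ idxs)
    (hnd : idxs.Nodup) (hrange : ∀ iii ∈ idxs, 0 ≤ iii ∧ iii < (ll0.length : Int))
    (hv : (PySem.List.pyGetD ll0 idx0 []).length = nmax0)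
    (d : Int) (rev : Bool) (fuel : Nat) (K : List Nat) (i : Nat) (hi : 1 ≤ i)
    (hf : K.length - i ≤ fuel) :
    pvALoop idxs d rev fuel (pvState ll0 idxs nmax0 K) i K.length
      = pvState ll0 idxs nmax0 (kLoop (PySem.List.pyGetD ll0 idx0 []) d rev K i) := by
  have hidx0 := hrange idx0 hmem
  induction fuel generalizing K i with
  | zero =>
    rw [pvALoop, kLoop, dif_neg (by omega)]
  | succ fuel ih =>
    rw [pvALoop, kLoop]
    by_cases hlt : i < K.length
    · rw [if_pos hlt, dif_pos hlt, hhead,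
          pvState_get_idx0 ll0 idxs nmax0 idx0 hmem hidx0 hv K]
      have hlt1 : i - 1 < K.length := by omega
      have ec : ((i : Int) - 1) = (((i - 1 : Nat)) : Int) := by omega
      have e1 : (PySem.List.pyGetD (K.map (fun q => (PySem.List.pyGetD ll0 idx0 []).getD q 0)) (i : Int) 0)
          = (PySem.List.pyGetD ll0 idx0 []).getD (K.getD i 0) 0 := by
        rw [PySem.List.pyGetD_natCast, List.getD_eq_getElem _ _ (by simpa using hlt),
            List.getElem_map, List.getD_eq_getElem _ _ hlt]
      have e2 : (PySem.List.pyGetD (K.map (fun q => (PySem.List.pyGetD ll0 idx0 []).getD q 0)) ((i : Int) - 1) 0)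
          = (PySem.List.pyGetD ll0 idx0 []).getD (K.getD (i - 1) 0) 0 := by
        rw [ec, PySem.List.pyGetD_natCast, List.getD_eq_getElem _ _ (by simpa using hlt1),
            List.getElem_map, List.getD_eq_getElem _ _ hlt1]
      rw [e1, e2]
      set j := if rev = true then i - 1 else i with hjdef
      have hj : j < K.length := by rw [hjdef]; split <;> omega
      split_ifs with hcond
      · rw [foldl_del_pvState ll0 idxs nmax0 K j hj hnd hrange]
        rw [show K.length - 1 = (pvDelAt K j).length by rw [length_pvDelAt _ _ hj]]
        exact ih (pvDelAt K j) i hi (by rw [length_pvDelAt _ _ hj]; omega)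
      · exact ih K (i+1) (by omega) (by omega)
    · rw [if_neg hlt, dif_neg hlt]

theorem pvState_init (ll0 : List (List Int)) (idxs : List Int) (nmax0 : Nat)
    (hlen : ∀ (t : Nat) (h : t < ll0.length), (t : Int) ∈ idxs → nmax0 ≤ ll0[t].length) :
    pvState ll0 idxs nmax0 (List.range nmax0) = ll0 := by
  apply List.ext_getElem (by simp [pvState])
  intro t h1 h2
  unfold pvState
  simp only [List.getElem_mapIdx]
  split
  · next hm => rw [map_getD_range _ _ (hlen t h2 hm), List.take_append_drop]
  · rfl

theorem pvState_eq_B (ll0 : List (List Int)) (c : Int) (nmax : Nat) (Kf : List Nat)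
    (_hc : 0 ≤ c ∧ c < (ll0.length : Int)) :
    pvState ll0
      (c :: (PySem.List.pyRange 0 (ll0.length : Int) 1).filter
        (fun i => decide (i ≠ c ∧ nmax ≤ (pvGetL ll0 i).length))) nmax Kf
      = (PySem.List.enumerate ll0).map (fun p =>
          if p.1 = c ∨ nmax ≤ p.2.length then
            Kf.map (fun (q : Nat) => PySem.List.pyGetD p.2 (q : Int) 0) ++ p.2.drop nmax
          else p.2) := by
  apply List.ext_getElem (by simp [pvState, PySem.List.length_enumerate])
  intro t h1 h2
  have ht : t < ll0.length := by simpa [pvState] using h1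
  rw [List.getElem_map, PySem.List.getElem_enumerate _ _ _ (by simpa [PySem.List.length_enumerate] using h2)]
  unfold pvState
  simp only [List.getElem_mapIdx, zero_add]
  have hmemiff : ((t : Int) ∈ c :: (PySem.List.pyRange 0 (ll0.length : Int) 1).filter
      (fun i => decide (i ≠ c ∧ nmax ≤ (pvGetL ll0 i).length))) ↔ ((t : Int) = c ∨ nmax ≤ ll0[t].length) := by
    simp only [List.mem_cons, List.mem_filter, PySem.List.mem_pyRange_one, decide_eq_true_eq]
    constructor
    · rintro (h | ⟨_, _, hlen⟩)
      · exact Or.inl h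
      · right
        rwa [pvGetL, PySem.List.pyGetD_natCast, List.getD_eq_getElem _ _ ht] at hlen
    · rintro (h | hlen)
      · exact Or.inl h
      · by_cases he : (t : Int) = c
        · exact Or.inl he
        · refine Or.inr ⟨⟨by omega, by omega⟩, he, ?_⟩
          rwa [pvGetL, PySem.List.pyGetD_natCast, List.getD_eq_getElem _ _ ht]
  by_cases hm : (t : Int) = c ∨ nmax ≤ ll0[t].length
  · rw [if_pos (hmemiff.mpr hm), if_pos hm]
    congr 1
    apply List.map_congr_left
    intro q _
    rw [PySem.List.pyGetD_natCast]
  · rw [if_neg (fun hx => hm (hmemiff.mp hx)), if_neg hm]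

theorem main_lemma (ll : List (List Int)) (delta : Int) (reverse : Bool) (c : Int)
    (hc : 0 ≤ c ∧ c < (ll.length : Int)) :
    pvALoop
      ((PySem.List.pyRange 0 (ll.length : Int) 1).foldl
        (fun acc i => if i ≠ c ∧ (pvGetL ll c).length ≤ (pvGetL ll i).length then acc ++ [i] else acc) [c])
      |delta| reverse (pvGetL ll c).length ll 1 (pvGetL ll c).length
    = (PySem.List.enumerate ll).map (fun p =>
        if p.1 = c ∨ (pvGetL ll c).length ≤ p.2.length then
          (if reverse then
              (List.range ((pvGetL ll c).length - 1)).filter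
                (fun k => |delta| ≤ |PySem.List.pyGetD (pvGetL ll c) ((k+1 : Nat) : Int) 0 -
                  PySem.List.pyGetD (pvGetL ll c) (k : Int) 0|)
              ++ (if 0 < (pvGetL ll c).length then [(pvGetL ll c).length - 1] else [])
            else if 0 < (pvGetL ll c).length then
              0 :: pvBFwd (pvGetL ll c) |delta| (pvGetL ll c).length (PySem.List.pyGetD (pvGetL ll c) 0 0) 1 (pvGetL ll c).length
            else []).map
            (fun (q : Nat) => PySem.List.pyGetD p.2 (q : Int) 0) ++ p.2.drop (pvGetL ll c).length
        else p.2) := by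
  generalize hvg : pvGetL ll c = v
  have hvg' : PySem.List.pyGetD ll c [] = v := hvg
  rw [PySem.List.foldl_append_ite_eq_filter, List.singleton_append]
  set nmax : Nat := v.length with hnmaxdef
  set idxs : List Int := c :: (PySem.List.pyRange 0 (ll.length : Int) 1).filter
    (fun i => decide (i ≠ c ∧ nmax ≤ (pvGetL ll i).length)) with hidef
  have hnd : idxs.Nodup := by
    rw [hidef]
    refine List.Nodup.cons ?_ (List.Nodup.filter _ (PySem.List.nodup_pyRange_one 0 (ll.length : Int)))
    intro hmem
    rcases List.mem_filter.mp hmem with ⟨_, hp⟩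
    simp at hp
  have hrange : ∀ iii ∈ idxs, 0 ≤ iii ∧ iii < (ll.length : Int) := by
    intro iii hm
    rcases List.mem_cons.mp hm with he | hf
    · subst he; exact hc
    · have := (List.mem_filter.mp hf).1
      rw [PySem.List.mem_pyRange_one] at this
      omega
  have hlen : ∀ (t : Nat) (h : t < ll.length), (t : Int) ∈ idxs → nmax ≤ ll[t].length := by
    intro t ht hm
    rcases List.mem_cons.mp hm with he | hf
    · have hx : PySem.List.pyGetD ll c [] = ll[t] := by
        rw [← he, PySem.List.pyGetD_natCast, List.getD_eq_getElem _ _ ht]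
      rw [hnmaxdef, ← hvg', hx]
    · have := (List.mem_filter.mp hf).2
      simp only [decide_eq_true_eq] at this
      rw [pvGetL, PySem.List.pyGetD_natCast, List.getD_eq_getElem _ _ ht] at this
      exact this.2
  have hvlen : (PySem.List.pyGetD ll c []).length = nmax := by rw [hvg']
  have hA : pvALoop idxs |delta| reverse nmax ll 1 nmax
      = pvState ll idxs nmax (kLoop v |delta| reverse (List.range nmax) 1) := by
    have h := pvALoop_eq_kLoop ll idxs nmax c rfl (by rw [hidef]; exact List.mem_cons_self)
      hnd hrange hvlen |delta| reverse nmax (List.range nmax) 1 le_rfl (by simp)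
    rw [pvState_init ll idxs nmax hlen, List.length_range, hvg'] at h
    exact h
  rw [hA]
  have hkeep : kLoop v |delta| reverse (List.range nmax) 1
      = (if reverse then
          (List.range (nmax - 1)).filter
            (fun k => |delta| ≤ |PySem.List.pyGetD v ((k+1 : Nat) : Int) 0 - PySem.List.pyGetD v (k : Int) 0|)
          ++ (if 0 < nmax then [nmax - 1] else [])
        else if 0 < nmax then 0 :: pvBFwd v |delta| nmax (PySem.List.pyGetD v 0 0) 1 nmax else []) := by
    cases reverse with
    | true =>
      rw [kLoop_rev v |delta| (List.range nmax) 1 le_rfl]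
      simp only [Nat.sub_self, List.take_zero, List.drop_zero, List.nil_append, if_true]
      by_cases hnm : 0 < nmax
      · rw [if_pos hnm]
        have hfr := filter_eq_revSpec v |delta| nmax 0 (by omega) hnm
        simp only [List.drop_zero] at hfr
        rw [← hfr]
        congr 1
        apply List.filter_congr
        intro q _
        simp only [PySem.List.pyGetD_natCast]
      · rw [if_neg hnm]
        have h00 : nmax = 0 := by omega
        rw [h00]
        simp [revSpec_nil]
    | false =>
      rw [kLoop_fwd v |delta| (List.range nmax) 1 le_rfl]
      by_cases hnm : 0 < nmax
      · simp only [Bool.false_eq_true, if_false]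
        rw [if_pos hnm]
        have ht1 : (List.range nmax).take 1 = [0] := by
          rw [List.take_range, min_eq_left (by omega), List.range_one]
        have hg0 : (List.range nmax).getD (1 - 1) 0 = 0 := by
          rw [List.getD_eq_getElem _ _ (by simpa using hnm)]
          simp
        rw [ht1, hg0, pvBFwd_eq v |delta| nmax _ 1 nmax (by omega), PySem.List.pyGetD_zero]
        rfl
      · simp only [Bool.false_eq_true, if_false]
        rw [if_neg hnm]
        have h00 : nmax = 0 := by omega
        rw [h00]
        simp [fwdSpec_nil]
  rw [hkeep, hidef]
  exact pvState_eq_B ll c nmax _ hc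

theorem final_eq (ll : List (List Int)) (delta index_compare : Int) (reverse : Bool) :
    list_list_elim_compare ll delta index_compare reverse
      = list_list_elim_compare_alt ll delta index_compare reverse := by
  cases ll with
  | nil => rfl
  | cons a t =>
    refine main_lemma (a :: t) delta reverse
      (min (max 0 index_compare) ((((a :: t).length : Nat) : Int) - 1)) ⟨?_, ?_⟩ <;> simp

-- ===== VERDICT (by name: the statement is the Claim_ definition above) =====
theorem list_list_elim_compare_spec : Claim_equal_list_list_elim_compare := by
  intro ll delta index_compare reverse _
  exact final_eq ll delta index_compare reverse
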